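-- pv_equiv track=rewrite | github.com/cuhauwhung/leetcode | 1181.before-and-after-puzzle.py | beforeAndAfterPuzzles
-- ===== SOURCE A (Python) =====
-- from typing import List
--
-- def beforeAndAfterPuzzles(phrases: List[str]) -> List[str]:
--
--     # idea: tokenize all the phrases first and go through them to check
--     res = list()
--     s = [st.split(' ') for st in phrases]
--
--     for i in range(len(s)):
--         for j in range(len(s)):
--             if j != i:
--                 if s[i][-1] == s[j][0]:
--                     res.append(s[i]+s[j][1:])
--
--     out = set([" ".join(w) for w in res])
--
--     return sorted(out)
-- ===== SOURCE B (Python) =====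
-- from typing import List
--
-- def beforeAndAfterPuzzles(phrases: List[str]) -> List[str]:
--     # index phrases by first word, then scan only matching phrases per source
--     s = [p.split(' ') for p in phrases]
--     pairs = [(t[0], (j, t)) for j, t in enumerate(s)]
--     index = {}
--     for key, item in pairs:
--         index.setdefault(key, []).append(item)
--     out = set()
--     for i, t in enumerate(s):
--         for j, u in index.get(t[-1], []):
--             if j != i:
--                 out.add(' '.join(t + u[1:]))
--     return sorted(out)
-- ===== Notes on version B (the rewrite author's own statement) =====
-- stated objective: faster
-- what changed: B builds a dict indexing the tokenized phrases by first word once, then for each phrase scans only the phrases whose first word matches its last word, instead of A's nested scan over all pairs.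
import Mathlib
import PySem

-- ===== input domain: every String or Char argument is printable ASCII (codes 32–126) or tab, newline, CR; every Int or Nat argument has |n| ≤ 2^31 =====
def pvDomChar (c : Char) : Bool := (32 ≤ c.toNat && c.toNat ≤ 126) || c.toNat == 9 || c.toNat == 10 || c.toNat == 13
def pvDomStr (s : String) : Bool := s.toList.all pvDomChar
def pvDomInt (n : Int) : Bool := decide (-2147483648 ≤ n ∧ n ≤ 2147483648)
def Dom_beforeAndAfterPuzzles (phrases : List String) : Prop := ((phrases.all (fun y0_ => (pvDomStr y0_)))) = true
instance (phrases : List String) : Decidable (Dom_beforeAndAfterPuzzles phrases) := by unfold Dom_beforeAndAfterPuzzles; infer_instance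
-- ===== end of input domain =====

-- B indexes the tokenized phrases by first word once and scans only the matching phrases per source, instead of A's all-pairs nested scan (a timing run reports B measurably faster).

-- ===== PORT A =====
-- st.split(' ') has a non-empty separator, so PySem.Str.split? is always `some`; `.getD []` is never taken.
def beforeAndAfterPuzzles (phrases : List String) : List String :=
  let s := phrases.map (fun st => (PySem.Str.split? st " ").getD [])
  let res := (PySem.List.pyRange 0 (s.length : Int) 1).foldl (fun res i =>
    (PySem.List.pyRange 0 (s.length : Int) 1).foldl (fun res j =>
      if j ≠ i then
        if PySem.List.pyGetD (PySem.List.pyGetD s i []) (-1) "" =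
           PySem.List.pyGetD (PySem.List.pyGetD s j []) 0 "" then
          res ++ [PySem.List.pyGetD s i [] ++ PySem.List.slice (PySem.List.pyGetD s j []) (some 1) none]
        else res
      else res) res) []
  PySem.List.sorted (PySem.Set.ofList (res.map (fun w => PySem.Str.join " " w))) (fun x => x) false

-- ===== PORT B =====
def beforeAndAfterPuzzles_alt (phrases : List String) : List String :=
  let s := phrases.map (fun st => (PySem.Str.split? st " ").getD [])
  let pairs := (PySem.List.enumerate s 0).map (fun p => (PySem.List.pyGetD p.2 0 "", p))
  let index := pairs.foldl (fun d q => PySem.Dict.modify d q.1 [] (· ++ [q.2])) PySem.Dict.empty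
  let out := (PySem.List.enumerate s 0).foldl (fun out p =>
      (PySem.Dict.getD index (PySem.List.pyGetD p.2 (-1) "") []).foldl (fun out q =>
        if q.1 ≠ p.1 then
          PySem.Set.add out (PySem.Str.join " " (p.2 ++ PySem.List.slice q.2 (some 1) none))
        else out) out)
    PySem.Set.empty
  PySem.List.sorted out (fun x => x) false

-- ===== PRECONDITION & SPEC =====
def Spec_beforeAndAfterPuzzles (phrases : List String) (out : List String) : Prop := out = beforeAndAfterPuzzles_alt phrases
instance (phrases : List String) (out : List String) : Decidable (Spec_beforeAndAfterPuzzles phrases out) := by unfold Spec_beforeAndAfterPuzzles; infer_instance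

-- ===== CLAIM (what is proved, stated in full; the proofs are below) =====
def Claim_equal_beforeAndAfterPuzzles : Prop := ∀ (phrases : List String), Dom_beforeAndAfterPuzzles phrases → Spec_beforeAndAfterPuzzles phrases (beforeAndAfterPuzzles phrases)

-- ===== LEMMAS AND PROOFS =====

-- set(xs + [y]) grows the ordered dedup list by add
theorem pv_ofList_append_singleton {α : Type} [BEq α] (xs : List α) (y : α) :
    PySem.Set.ofList (xs ++ [y]) = PySem.Set.add (PySem.Set.ofList xs) y := by
  simp [PySem.Set.ofList_eq_foldl, List.foldl_append]

-- a fold whose body first tests C then filters on p equals the fold over the p-filtered list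
theorem pv_foldl_if_if_filter {α β : Type} (l : List α) (P : α → Prop) [DecidablePred P]
    (C : α → Prop) [DecidablePred C] (g : β → α → β) (init : β) :
    l.foldl (fun r x => if C x then (if P x then g r x else r) else r) init
      = (l.filter (fun x => decide (P x))).foldl (fun r x => if C x then g r x else r) init := by
  induction l generalizing init with
  | nil => rfl
  | cons x t ih =>
    by_cases hc : C x <;> by_cases hp : P x <;>
      simp [hp, hc, ih]

-- decide (a = b) as the Bool test (b == a)
theorem pv_decide_eq_beq {α : Type} [DecidableEq α] [BEq α] [LawfulBEq α] (a b : α) :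
    (decide (a = b)) = (b == a) := by
  simp [beq_eq_decide, eq_comm]

-- the first-word index: looking up w returns exactly the enumerated phrases whose first word is w, in order
theorem pv_index_getD (s : List (List String)) (w : String) :
    PySem.Dict.getD
        (((PySem.List.enumerate s 0).map (fun p => (PySem.List.pyGetD p.2 0 "", p))).foldl
          (fun d q => PySem.Dict.modify d q.1 [] (· ++ [q.2])) PySem.Dict.empty) w []
      = (PySem.List.enumerate s 0).filter (fun q => PySem.List.pyGetD q.2 0 "" == w) := by
  rw [PySem.Dict.getD_foldl_modify_append]
  rw [List.filter_map]
  simp [PySem.Dict.getD, PySem.Dict.get?, PySem.Dict.empty, Function.comp_def]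

-- A's loop over range(len(s)) is a loop over the enumerated token lists
theorem pv_range_fold_enum {beta : Type} (s : List (List String)) (g : beta → (Int × List String) → beta) (init : beta) :
    (PySem.List.pyRange 0 (s.length : Int) 1).foldl (fun a j => g a (j, PySem.List.pyGetD s j [])) init
      = (PySem.List.enumerate s 0).foldl g init := by
  rw [PySem.List.enumerate_eq_map_pyRange s [], List.foldl_map]
  simp [PySem.List.len]

-- the heart of the equivalence: A's all-pairs collection, deduplicated, IS B's indexed collection
theorem pv_main_fold (s : List (List String)) :
    PySem.Set.ofList
        (((PySem.List.pyRange 0 (s.length : Int) 1).foldl (fun res i =>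
            (PySem.List.pyRange 0 (s.length : Int) 1).foldl (fun res j =>
              if j ≠ i then
                if PySem.List.pyGetD (PySem.List.pyGetD s i []) (-1) "" =
                   PySem.List.pyGetD (PySem.List.pyGetD s j []) 0 "" then
                  res ++ [PySem.List.pyGetD s i [] ++ PySem.List.slice (PySem.List.pyGetD s j []) (some 1) none]
                else res
              else res) res) []).map (fun w => PySem.Str.join " " w))
      = (PySem.List.enumerate s 0).foldl (fun out p =>
          (PySem.Dict.getD
              (((PySem.List.enumerate s 0).map (fun p => (PySem.List.pyGetD p.2 0 "", p))).foldl
                (fun d q => PySem.Dict.modify d q.1 [] (· ++ [q.2])) PySem.Dict.empty)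
              (PySem.List.pyGetD p.2 (-1) "") []).foldl
            (fun out q =>
              if q.1 ≠ p.1 then
                PySem.Set.add out (PySem.Str.join " " (p.2 ++ PySem.List.slice q.2 (some 1) none))
              else out) out)
        PySem.Set.empty := by
  rw [pv_range_fold_enum s (fun res (p : Int × List String) =>
        (PySem.List.pyRange 0 (s.length : Int) 1).foldl (fun res j =>
          if j ≠ p.1 then
            if PySem.List.pyGetD p.2 (-1) "" = PySem.List.pyGetD (PySem.List.pyGetD s j []) 0 "" then
              res ++ [p.2 ++ PySem.List.slice (PySem.List.pyGetD s j []) (some 1) none]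
            else res
          else res) res) []]
  refine (List.foldl_hom (fun r : List (List String) => PySem.Set.ofList (r.map (fun w => PySem.Str.join " " w))) ?_).symm
  intro r p
  rw [pv_index_getD]
  rw [pv_range_fold_enum s (fun res (q : Int × List String) =>
        if q.1 ≠ p.1 then
          if PySem.List.pyGetD p.2 (-1) "" = PySem.List.pyGetD q.2 0 "" then
            res ++ [p.2 ++ PySem.List.slice q.2 (some 1) none]
          else res
        else res) r]
  rw [pv_foldl_if_if_filter (PySem.List.enumerate s 0)
        (fun q : Int × List String => PySem.List.pyGetD p.2 (-1) "" = PySem.List.pyGetD q.2 0 "")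
        (fun q : Int × List String => q.1 ≠ p.1)
        (fun res q => res ++ [p.2 ++ PySem.List.slice q.2 (some 1) none]) r]
  rw [show (fun q : Int × List String => decide (PySem.List.pyGetD p.2 (-1) "" = PySem.List.pyGetD q.2 0 ""))
        = (fun q : Int × List String => PySem.List.pyGetD q.2 0 "" == PySem.List.pyGetD p.2 (-1) "")
      from funext fun q => pv_decide_eq_beq _ _]
  refine List.foldl_hom (fun r : List (List String) => PySem.Set.ofList (r.map (fun w => PySem.Str.join " " w))) ?_
  intro r q
  by_cases h : q.1 ≠ p.1 <;>
    simp [h, List.map_append, pv_ofList_append_singleton]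

-- ===== VERDICT (by name: the statement is the Claim_ definition above) =====
theorem beforeAndAfterPuzzles_spec : Claim_equal_beforeAndAfterPuzzles := by
  intro phrases _
  unfold Spec_beforeAndAfterPuzzles beforeAndAfterPuzzles beforeAndAfterPuzzles_alt
  simp only []
  rw [pv_main_fold]
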